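-- pv_equiv track=rewrite | github.com/kamilGie/WDI | Kolokwia/Kolokwium_1/2020_0/rozwiazanie0_2020.py | zad0better
-- ===== SOURCE A (Python) =====
-- def zad0better(num):
--     digits = [1, 1, 2, 6, 4, 2, 2, 4, 2, 8]
--
--     # xddd
--     if num < 10:
--         return digits[num]
--
--     ten_digit = (num // 10) % 10
--     if ten_digit % 2 == 1:
--         return 4 * zad0better(num // 5) * digits[num % 10] % 10
--     else:
--         return 6 * zad0better(num // 5) * digits[num % 10] % 10
-- ===== SOURCE B (Python) =====
-- def zad0better(num):
--     digits = [1, 1, 2, 6, 4, 2, 2, 4, 2, 8]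
--     if num < 10:
--         return digits[num]
--     result = 1
--     while num >= 10:
--         factor = 4 if (num // 10) % 10 % 2 == 1 else 6
--         result = result * factor * digits[num % 10]
--         num //= 5
--     return result * digits[num] % 10
-- ===== Notes on version B (the rewrite author's own statement) =====
-- stated objective: alternative
-- what changed: Replaces the recursion on num//5 by an iterative while-loop that accumulates the 4/6 factor and the digit-table entry into a running product and takes a single final % 10, relying on multiplicativity of mod.
import Mathlib
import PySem

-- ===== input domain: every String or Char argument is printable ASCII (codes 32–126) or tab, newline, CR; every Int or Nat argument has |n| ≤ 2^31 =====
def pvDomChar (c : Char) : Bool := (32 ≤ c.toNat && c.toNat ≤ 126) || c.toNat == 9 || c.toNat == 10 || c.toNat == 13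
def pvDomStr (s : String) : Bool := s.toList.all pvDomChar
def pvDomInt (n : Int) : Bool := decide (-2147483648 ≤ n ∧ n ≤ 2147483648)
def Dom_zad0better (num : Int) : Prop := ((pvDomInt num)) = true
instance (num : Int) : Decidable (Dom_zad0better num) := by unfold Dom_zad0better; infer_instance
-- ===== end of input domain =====

-- B replaces A's recursion on num//5 by an iterative loop accumulating the factors
-- into a running product with a single final % 10 (alternative decomposition, same cost).

-- ===== PORT A =====
def pvDigits : List Int := [1, 1, 2, 6, 4, 2, 2, 4, 2, 8]

def zad0better (num : Int) : Int :=
  if num < 10 then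
    PySem.List.pyGetD pvDigits num 0
  else
    let tenDigit := PySem.Int.mod (PySem.Int.floordiv num 10) 10
    if PySem.Int.mod tenDigit 2 = 1 then
      PySem.Int.mod (4 * zad0better (PySem.Int.floordiv num 5) *
        PySem.List.pyGetD pvDigits (PySem.Int.mod num 10) 0) 10
    else
      PySem.Int.mod (6 * zad0better (PySem.Int.floordiv num 5) *
        PySem.List.pyGetD pvDigits (PySem.Int.mod num 10) 0) 10
termination_by num.toNat
decreasing_by
  all_goals rw [PySem.Int.floordiv_eq_ediv_of_pos (by norm_num)]
  all_goals omega

-- ===== PORT B =====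
-- the while-loop of Source B: `result` is the accumulator
def pvLoopB (num result : Int) : Int :=
  if 10 ≤ num then
    let factor : Int :=
      if PySem.Int.mod (PySem.Int.mod (PySem.Int.floordiv num 10) 10) 2 = 1 then 4 else 6
    pvLoopB (PySem.Int.floordiv num 5)
      (result * factor * PySem.List.pyGetD pvDigits (PySem.Int.mod num 10) 0)
  else
    PySem.Int.mod (result * PySem.List.pyGetD pvDigits num 0) 10
termination_by num.toNat
decreasing_by
  rw [PySem.Int.floordiv_eq_ediv_of_pos (by norm_num)]
  omega

def zad0better_alt (num : Int) : Int :=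
  if num < 10 then
    PySem.List.pyGetD pvDigits num 0
  else
    pvLoopB num 1

-- ===== PRECONDITION & SPEC =====
-- Pre_ excludes num < -10, where both Pythons raise IndexError (digits[num] out of range).
def Pre_zad0better (num : Int) : Prop := -10 ≤ num
instance (num : Int) : Decidable (Pre_zad0better num) := by unfold Pre_zad0better; infer_instance
def pvWitness_zad0better : Int := 37

def Spec_zad0better (num : Int) (out : Int) : Prop := out = zad0better_alt num
instance (num : Int) (out : Int) : Decidable (Spec_zad0better num out) := by unfold Spec_zad0better; infer_instance

-- ===== CLAIM (what is proved, stated in full; the proofs are below) =====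
def Claim_equal_zad0better : Prop := ∀ (num : Int), Dom_zad0better num → Pre_zad0better num → Spec_zad0better num (zad0better num)

-- ===== LEMMAS AND PROOFS =====

-- A's result is already reduced mod 10 when the recursive branch fired
theorem zad0better_emod (num : Int) (h : ¬ num < 10) :
    PySem.Int.mod (zad0better num) 10 = zad0better num := by
  rw [zad0better]
  simp only [h, if_false]
  simp only [PySem.Int.mod_eq_emod_of_pos (by norm_num : (0:Int) < 10)]
  split_ifs <;> exact Int.emod_emod_of_dvd _ dvd_rfl

-- loop invariant: the accumulator multiplies into A's value, mod 10
theorem pvLoopB_eq_aux : ∀ (k : Nat) (num : Int), num.toNat = k → 0 ≤ num →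
    ∀ acc : Int, pvLoopB num acc = PySem.Int.mod (acc * zad0better num) 10 := by
  intro k
  induction k using Nat.strong_induction_on with
  | _ k ih =>
    intro num hk hnum acc
    rw [pvLoopB, zad0better]
    by_cases h : num < 10
    · simp only [h, if_true, if_neg (by omega : ¬ 10 ≤ num)]
    · simp only [h, if_false, if_pos (by omega : 10 ≤ num)]
      have hq : PySem.Int.floordiv num 5 = num / 5 :=
        PySem.Int.floordiv_eq_ediv_of_pos (by norm_num)
      have hlt : num / 5 < num := by omega
      have hge : 0 ≤ num / 5 := by omega
      have ihq := ih (num / 5).toNat (by omega) (num / 5) rfl hge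
      rw [hq, ihq]
      set d := PySem.List.pyGetD pvDigits (PySem.Int.mod num 10) 0 with hd
      set z := zad0better (num / 5) with hz
      simp only [PySem.Int.mod_eq_emod_of_pos (by norm_num : (0:Int) < 10)]
      split_ifs
      · calc acc * 4 * d * z % 10
            = acc * (4 * z * d) % 10 := by ring_nf
          _ = acc % 10 * ((4 * z * d) % 10) % 10 := by rw [Int.mul_emod]
          _ = acc % 10 * ((4 * z * d) % 10 % 10) % 10 := by
                rw [Int.emod_emod_of_dvd _ dvd_rfl]
          _ = acc * ((4 * z * d) % 10) % 10 := by rw [← Int.mul_emod]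
      · calc acc * 6 * d * z % 10
            = acc * (6 * z * d) % 10 := by ring_nf
          _ = acc % 10 * ((6 * z * d) % 10) % 10 := by rw [Int.mul_emod]
          _ = acc % 10 * ((6 * z * d) % 10 % 10) % 10 := by
                rw [Int.emod_emod_of_dvd _ dvd_rfl]
          _ = acc * ((6 * z * d) % 10) % 10 := by rw [← Int.mul_emod]

theorem pvLoopB_eq (num : Int) (hnum : 0 ≤ num) :
    ∀ acc : Int, pvLoopB num acc = PySem.Int.mod (acc * zad0better num) 10 :=
  pvLoopB_eq_aux num.toNat num rfl hnum

-- ===== VERDICT (by name: the statement is the Claim_ definition above) =====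
theorem zad0better_spec : Claim_equal_zad0better := by
  intro num _ _
  unfold Spec_zad0better zad0better_alt
  by_cases h : num < 10
  · rw [zad0better]
    simp only [h, if_true]
  · simp only [h, if_false]
    rw [pvLoopB_eq num (by omega) 1, one_mul]
    exact (zad0better_emod num h).symm
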